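-- pv_equiv track=rewrite | github.com/zxl3651/CodingTest | programmers/Lv.2 더 맵게.py | solution
-- ===== SOURCE A (Python) =====
-- import heapq
--
-- def solution(scoville, K):
--     answer = 0
--     heapq.heapify(scoville)
--     flag = 0
--     while(1):
--         if len(scoville) <= 1 and scoville[0] < K:
--             return -1
--         n1 = heapq.heappop(scoville)
--         if n1 >= K:
--             break
--         n2 = heapq.heappop(scoville)
--         add = n1 + (n2 * 2)
--         heapq.heappush(scoville, add)
--         answer += 1
--     return answer
-- ===== SOURCE B (Python) =====
-- def solution(scoville, K):
--     # repeated-minimum scan on a plain list instead of a heap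
--     # (mutates scoville like A does, but leaves a different element order;
--     #  the equivalence claimed is about the return value only)
--     answer = 0
--     while True:
--         if len(scoville) <= 1 and scoville[0] < K:
--             return -1
--         n1 = min(scoville)
--         scoville.remove(n1)
--         if n1 >= K:
--             return answer
--         n2 = min(scoville)
--         scoville.remove(n2)
--         scoville.append(n1 + 2 * n2)
--         answer += 1
-- ===== Notes on version B (the rewrite author's own statement) =====
-- stated objective: simpler
-- what changed: Replaces the heapq binary heap with a plain list scanned for its minimum (min + remove) each round, dropping the heapq import; same return values, different leftover order in the mutated argument.
-- outside the precondition, e.g. on solution([], 5): A raises IndexError, B raises IndexError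
import Mathlib
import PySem

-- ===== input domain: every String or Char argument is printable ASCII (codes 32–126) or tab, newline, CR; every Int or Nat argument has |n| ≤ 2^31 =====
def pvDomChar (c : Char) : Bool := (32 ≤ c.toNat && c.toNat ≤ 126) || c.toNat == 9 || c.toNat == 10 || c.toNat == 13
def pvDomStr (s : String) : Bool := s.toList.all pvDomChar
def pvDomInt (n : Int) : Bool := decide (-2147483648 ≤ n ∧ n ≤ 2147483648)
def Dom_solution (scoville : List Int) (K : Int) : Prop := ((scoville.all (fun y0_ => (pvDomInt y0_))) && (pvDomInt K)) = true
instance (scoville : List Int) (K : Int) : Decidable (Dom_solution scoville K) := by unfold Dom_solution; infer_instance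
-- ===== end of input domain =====

-- B replaces A's heapq binary heap by a repeated-minimum scan of a plain list (simpler, no import);
-- return values agree; both mutate the Python argument, into different leftover orders (return value only is claimed).

-- ===== PORT A =====
-- A calls the heapq library; PySem has no heap primitive, so heapq's array-based binary min-heap
-- (heapify / heappop / heappush) is ported by hand below.  The sift routines keep the standard
-- swap-down / swap-up form; this is exact for every value A's code observes (the sequence of popped
-- minima), since heappop returns the minimum of the heap's multiset.

/-- swap the entries at indices `i` and `j` -/
def hswap (l : List Int) (i j : Nat) : List Int := (l.set i (l.getD j 0)).set j (l.getD i 0)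

/-- index of the smallest among `i` and its (existing) children `2i+1`, `2i+2` -/
def hsmallest (l : List Int) (i : Nat) : Nat :=
  if 2*i+2 < l.length ∧
      l.getD (2*i+2) 0 <
        l.getD (if 2*i+1 < l.length ∧ l.getD (2*i+1) 0 < l.getD i 0 then 2*i+1 else i) 0
  then 2*i+2
  else if 2*i+1 < l.length ∧ l.getD (2*i+1) 0 < l.getD i 0 then 2*i+1 else i

theorem hsmallest_ne (l : List Int) (i : Nat) (h : hsmallest l i ≠ i) :
    i < hsmallest l i ∧ hsmallest l i < l.length := by
  unfold hsmallest at *; split_ifs at * with h1 h2 h2 <;> omega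

/-- sift the entry at `i` down until the subtree rooted at `i` is heap-ordered -/
def hsiftDown (l : List Int) (i : Nat) : List Int :=
  let s := hsmallest l i
  if hs : s = i then l else hsiftDown (hswap l i s) s
termination_by l.length - i
decreasing_by
  have := hsmallest_ne l i hs
  simp only [hswap, List.length_set]; omega

def heapifyGo : Nat → List Int → List Int
  | 0, l => l
  | k+1, l => heapifyGo k (hsiftDown l k)

/-- heapq.heapify -/
def heapify (l : List Int) : List Int := heapifyGo (l.length / 2) l

/-- heapq.heappop: root out, last element to the root, sift down.
    (Python raises IndexError on an empty heap; that case is unreachable under Pre_.) -/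
def heappop : List Int → Int × List Int
  | [] => (0, [])
  | [x] => (x, [])
  | x :: y :: xs => (x, hsiftDown (((y :: xs).getLast (by simp)) :: (y :: xs).dropLast) 0)

/-- sift the entry at `j` up while it is smaller than its parent -/
def hsiftUp (l : List Int) (j : Nat) : List Int :=
  if h : 0 < j then
    if l.getD j 0 < l.getD ((j-1)/2) 0 then hsiftUp (hswap l j ((j-1)/2)) ((j-1)/2) else l
  else l
termination_by j
decreasing_by omega

/-- heapq.heappush -/
def heappush (l : List Int) (x : Int) : List Int := hsiftUp (l ++ [x]) l.length

/-- A's while-loop.  Fuel `length+1` always suffices (each mixing round shrinks the heap by one);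
    the fuel-0 branch is unreachable from `solution`. -/
def loopA : Nat → List Int → Int → Int → Int
  | 0, _, _, answer => answer
  | fuel+1, heap, K, answer =>
    if heap.length ≤ 1 ∧ PySem.List.pyGetD heap 0 0 < K then -1
    else
      let p := heappop heap
      if p.1 ≥ K then answer
      else
        let p2 := heappop p.2
        loopA fuel (heappush p2.2 (p.1 + p2.1 * 2)) K (answer + 1)

def solution (scoville : List Int) (K : Int) : Int :=
  loopA (scoville.length + 1) (heapify scoville) K 0

-- ===== PORT B =====
-- B's loop: take the minimum twice by a plain scan, remove it, append the mix.
def loopB : Nat → List Int → Int → Int → Int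
  | 0, _, _, answer => answer
  | fuel+1, sc, K, answer =>
    if sc.length ≤ 1 ∧ PySem.List.pyGetD sc 0 0 < K then -1
    else
      match PySem.List.min? sc (fun x => x) with
      | none => answer   -- min([]) raises in Python; unreachable under Pre_
      | some n1 =>
        let sc1 := (PySem.List.remove? sc n1).getD sc
        if n1 ≥ K then answer
        else
          match PySem.List.min? sc1 (fun x => x) with
          | none => answer
          | some n2 =>
            loopB fuel (((PySem.List.remove? sc1 n2).getD sc1) ++ [n1 + 2 * n2]) K (answer + 1)

def solution_alt (scoville : List Int) (K : Int) : Int :=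
  loopB (scoville.length + 1) scoville K 0

-- ===== PRECONDITION & SPEC =====
-- Pre_ excludes only the empty list, on which A raises IndexError at `scoville[0]` (B does too).
def Pre_solution (scoville : List Int) (K : Int) : Prop := scoville ≠ []
instance (scoville : List Int) (K : Int) : Decidable (Pre_solution scoville K) := by
  unfold Pre_solution; infer_instance

def pvWitness_solution : List Int × Int := ([1, 2, 3, 9, 10, 12], 7)

def Spec_solution (scoville : List Int) (K : Int) (out : Int) : Prop := out = solution_alt scoville K
instance (scoville : List Int) (K : Int) (out : Int) : Decidable (Spec_solution scoville K out) := by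
  unfold Spec_solution; infer_instance

-- ===== CLAIM (what is proved, stated in full; the proofs are below) =====
def Claim_equal_solution : Prop := ∀ (scoville : List Int) (K : Int), Dom_solution scoville K → Pre_solution scoville K → Spec_solution scoville K (solution scoville K)

-- ===== LEMMAS AND PROOFS =====
theorem getD_set_self (l : List Int) (i : Nat) (x : Int) (h : i < l.length) :
    (l.set i x).getD i 0 = x := by
  simp [List.getD, h]

theorem getD_set_ne (l : List Int) (i j : Nat) (x : Int) (h : i ≠ j) :
    (l.set i x).getD j 0 = l.getD j 0 := by
  simp [List.getD, List.getElem?_set_ne h]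

theorem count_set (l : List Int) (i : Nat) (x v : Int) (h : i < l.length) :
    (l.set i x).count v + (if l.getD i 0 = v then 1 else 0)
      = l.count v + (if x = v then 1 else 0) := by
  induction l generalizing i with
  | nil => simp at h
  | cons a t ih =>
    cases i with
    | zero => simp [List.count_cons]; split_ifs <;> omega
    | succ n =>
      have ih' := ih n (by simpa using h)
      simp only [List.set_cons_succ, List.count_cons, List.getD_cons_succ]
      split_ifs at ih' ⊢ <;> omega

theorem hswap_count (l : List Int) (i j : Nat) (v : Int)
    (hi : i < l.length) (hj : j < l.length) :
    (hswap l i j).count v = l.count v := by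
  have hj' : j < (l.set i (l.getD j 0)).length := by simpa using hj
  have c2 := count_set (l.set i (l.getD j 0)) j (l.getD i 0) v hj'
  have c1 := count_set l i (l.getD j 0) v hi
  have hgj : (l.set i (l.getD j 0)).getD j 0 = l.getD j 0 := by
    by_cases hij : i = j
    · subst hij; exact getD_set_self l i _ hi
    · exact getD_set_ne l i j _ hij
  rw [hgj] at c2
  unfold hswap
  split_ifs at c1 c2 ⊢ <;> omega

theorem hswap_perm (l : List Int) (i j : Nat) (hi : i < l.length) (hj : j < l.length) :
    (hswap l i j).Perm l := by
  rw [List.perm_iff_count]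
  intro v; exact hswap_count l i j v hi hj

theorem hswap_length (l : List Int) (i j : Nat) : (hswap l i j).length = l.length := by
  simp [hswap]
/-- `j` lies in the subtree rooted at `i` (repeatedly taking parents from `j` reaches `i`) -/
def isDesc (i j : Nat) : Bool :=
  if j ≤ i then j == i else isDesc i ((j-1)/2)
termination_by j
decreasing_by omega

theorem isDesc_self (i : Nat) : isDesc i i = true := by
  unfold isDesc; simp

theorem isDesc_le {i j : Nat} (h : isDesc i j = true) : i ≤ j := by
  unfold isDesc at h
  split_ifs at h with h1
  · simp at h; omega
  · omega

theorem isDesc_child {i k j : Nat} (hk : isDesc i k = true)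
    (hj : j = 2*k+1 ∨ j = 2*k+2) : isDesc i j = true := by
  have hik := isDesc_le hk
  have hkj : (j-1)/2 = k := by omega
  unfold isDesc
  have : ¬ j ≤ i := by omega
  simp [this, hkj, hk]

theorem isDesc_trans {j k : Nat} (i : Nat) (h1 : isDesc i j = true) (h2 : isDesc j k = true) :
    isDesc i k = true := by
  induction k using Nat.strong_induction_on with
  | _ k ih =>
    unfold isDesc at h2
    split_ifs at h2 with hkj
    · simp at h2; subst h2; exact h1
    · have hij := isDesc_le h1
      have hq : isDesc j ((k-1)/2) = true := h2
      have := ih ((k-1)/2) (by omega) hq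
      unfold isDesc
      have : ¬ k ≤ i := by omega
      simp [this]
      have := ih ((k-1)/2) (by omega) hq
      exact this

theorem isDesc_parent {i j : Nat} (h : isDesc i j = true) (hne : j ≠ i) :
    isDesc i ((j-1)/2) = true ∧ i ≤ (j-1)/2 := by
  unfold isDesc at h
  split_ifs at h with h1
  · simp at h; omega
  · exact ⟨h, isDesc_le h⟩

theorem not_isDesc_of_lt {i j : Nat} (h : j < i) : isDesc i j = false := by
  unfold isDesc
  rw [if_pos (Nat.le_of_lt h)]
  simp; omega

/-- every index is a descendant of the root -/
theorem isDesc_zero (j : Nat) : isDesc 0 j = true := by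
  induction j using Nat.strong_induction_on with
  | _ j ih =>
    unfold isDesc
    split_ifs with h1
    · simp; omega
    · exact ih ((j-1)/2) (by omega)
theorem hsmallest_cases (l : List Int) (i : Nat) :
    hsmallest l i = i ∨
      ((hsmallest l i = 2*i+1 ∨ hsmallest l i = 2*i+2) ∧ hsmallest l i < l.length) := by
  unfold hsmallest; split_ifs <;> omega

theorem hsmallest_le_root (l : List Int) (i : Nat) :
    l.getD (hsmallest l i) 0 ≤ l.getD i 0 := by
  unfold hsmallest; split_ifs <;> omega

theorem hsmallest_le_child (l : List Int) (i j : Nat)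
    (hj : j = 2*i+1 ∨ j = 2*i+2) (hjn : j < l.length) :
    l.getD (hsmallest l i) 0 ≤ l.getD j 0 := by
  unfold hsmallest
  rcases hj with hj | hj <;> subst hj <;> split_ifs <;> omega

/-- all parent/child pairs with parent index ≥ i are heap-ordered -/
def HeapFrom (l : List Int) (i : Nat) : Prop :=
  ∀ p j, i ≤ p → (j = 2*p+1 ∨ j = 2*p+2) → j < l.length → l.getD p 0 ≤ l.getD j 0

theorem heap_chain (l : List Int) (s : Nat) (hP : HeapFrom l s) :
    ∀ j, isDesc s j = true → j < l.length → l.getD s 0 ≤ l.getD j 0 := by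
  intro j
  induction j using Nat.strong_induction_on with
  | _ j ih =>
    intro hd hj
    by_cases hjs : j = s
    · subst hjs; exact le_refl _
    · obtain ⟨hq, hsq⟩ := isDesc_parent hd hjs
      have hsj : s < j := by have := isDesc_le hd; omega
      have hqj : j = 2*((j-1)/2)+1 ∨ j = 2*((j-1)/2)+2 := by omega
      have h1 := hP ((j-1)/2) j hsq hqj hj
      have h2 := ih ((j-1)/2) (by omega) hq (by omega)
      omega

theorem hsiftDown_length (l : List Int) (i : Nat) : (hsiftDown l i).length = l.length := by
  induction l, i using hsiftDown.induct with
  | case1 l i s hs => unfold hsiftDown; rw [dif_pos hs]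
  | case2 l i s hs ih =>
    unfold hsiftDown
    rw [dif_neg hs]
    rw [ih, hswap_length]
theorem hswap_getD_left (l : List Int) (i s : Nat) (hi : i < l.length) (hne : i ≠ s) :
    (hswap l i s).getD i 0 = l.getD s 0 := by
  unfold hswap
  rw [getD_set_ne _ _ _ _ (Ne.symm hne), getD_set_self _ _ _ hi]

theorem hswap_getD_right (l : List Int) (i s : Nat) (hs : s < l.length) :
    (hswap l i s).getD s 0 = l.getD i 0 := by
  unfold hswap
  rw [getD_set_self]
  simpa using hs

theorem hswap_getD_other (l : List Int) (i s j : Nat) (h1 : j ≠ i) (h2 : j ≠ s) :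
    (hswap l i s).getD j 0 = l.getD j 0 := by
  unfold hswap
  rw [getD_set_ne _ _ _ _ (Ne.symm h2), getD_set_ne _ _ _ _ (Ne.symm h1)]

theorem isDesc_false_step (s j : Nat) (hj : s < j) (hp : isDesc s ((j-1)/2) = false) :
    isDesc s j = false := by
  unfold isDesc; rw [if_neg (by omega)]; exact hp

theorem heapFrom_mono {l : List Int} {a b : Nat} (h : HeapFrom l a) (hab : a ≤ b) :
    HeapFrom l b := fun p j hp => h p j (by omega)

theorem hsiftDown_perm (l : List Int) (i : Nat) : (hsiftDown l i).Perm l := by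
  induction l, i using hsiftDown.induct with
  | case1 l i s hs => rw [hsiftDown, dif_pos hs]
  | case2 l i s hs ih =>
    rw [hsiftDown, dif_neg hs]
    rcases hsmallest_cases l i with h | ⟨hc, hn⟩
    · exact absurd h hs
    · exact ih.trans (hswap_perm l i s (by omega) hn)

theorem hsiftDown_outside (l : List Int) (i : Nat) (j : Nat) (hj : isDesc i j = false) :
    (hsiftDown l i).getD j 0 = l.getD j 0 := by
  induction l, i using hsiftDown.induct generalizing j with
  | case1 l i s hs => rw [hsiftDown, dif_pos hs]
  | case2 l i s hs ih =>
    rw [hsiftDown, dif_neg hs]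
    rcases hsmallest_cases l i with h | ⟨hc, hn⟩
    · exact absurd h hs
    · have hds : isDesc i s = true := isDesc_child (isDesc_self i) hc
      have hdsj : isDesc s j = false := by
        cases hsj : isDesc s j
        · rfl
        · rw [isDesc_trans i hds hsj] at hj; exact absurd hj (by simp)
      have hji : j ≠ i := by
        intro h; rw [h, isDesc_self] at hj; exact absurd hj (by simp)
      have hjs : j ≠ s := by
        intro h; rw [h, isDesc_self] at hdsj; exact absurd hdsj (by simp)
      rw [ih j hdsj, hswap_getD_other l i s j hji hjs]

theorem hsiftDown_lb (l : List Int) (i : Nat) (b : Int)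
    (hb : ∀ j, isDesc i j = true → j < l.length → b ≤ l.getD j 0) :
    ∀ j, isDesc i j = true → j < l.length → b ≤ (hsiftDown l i).getD j 0 := by
  induction l, i using hsiftDown.induct with
  | case1 l i s hs => rw [hsiftDown, dif_pos hs]; exact hb
  | case2 l i s hs ih =>
    rw [hsiftDown, dif_neg hs]
    rcases hsmallest_cases l i with h | ⟨hc, hn⟩
    · exact absurd h hs
    · have hin : i < l.length := by omega
      have his : i < s := by omega
      have hds : isDesc i s = true := isDesc_child (isDesc_self i) hc
      have hb' : ∀ j, isDesc s j = true → j < (hswap l i s).length → b ≤ (hswap l i s).getD j 0 := by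
        intro j hdj hjl
        rw [hswap_length] at hjl
        by_cases hjs : j = s
        · subst hjs; rw [hswap_getD_right l i s hn]
          exact hb i (isDesc_self i) hin
        · have hji : j ≠ i := by have := isDesc_le hdj; omega
          rw [hswap_getD_other l i s j hji hjs]
          exact hb j (isDesc_trans i hds hdj) hjl
      intro j hdj hjl
      by_cases hsj : isDesc s j = true
      · exact ih hb' j hsj (by rw [hswap_length]; exact hjl)
      · rw [hsiftDown_outside _ _ j (by simpa using hsj)]
        by_cases hji : j = i
        · subst hji; rw [hswap_getD_left l j s (by omega) (by omega)]
          exact hb s hds hn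
        · have hjs : j ≠ s := by intro h; rw [h, isDesc_self] at hsj; exact hsj rfl
          rw [hswap_getD_other l i s j hji hjs]
          exact hb j hdj hjl

theorem hsiftDown_heapFrom (l : List Int) (i : Nat) (hP : HeapFrom l (i+1)) :
    HeapFrom (hsiftDown l i) i := by
  induction l, i using hsiftDown.induct with
  | case1 l i s hs =>
    rw [hsiftDown, dif_pos hs]
    intro p j hp hj hjn
    by_cases hpi : p = i
    · subst hpi
      have h2 := hsmallest_le_child l p j hj hjn
      have hs' : hsmallest l p = p := hs
      rwa [hs'] at h2
    · exact hP p j (by omega) hj hjn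
  | case2 l i s hs ih =>
    rw [hsiftDown, dif_neg hs]
    rcases hsmallest_cases l i with h | ⟨hc, hn⟩
    · exact absurd h hs
    · have hin : i < l.length := by omega
      have his : i < s := by omega
      have hlen1 : (hswap l i s).length = l.length := hswap_length l i s
      -- the swapped list is heap-ordered for parents above s
      have hP1 : HeapFrom (hswap l i s) (s+1) := by
        intro p j hp hj hjn
        rw [hlen1] at hjn
        have hpj : p < j := by omega
        rw [hswap_getD_other l i s p (by omega) (by omega),
            hswap_getD_other l i s j (by omega) (by omega)]
        exact hP p j (by omega) hj hjn
      have ih' := ih hP1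
      have hlen2 : (hsiftDown (hswap l i s) s).length = l.length := by
        rw [hsiftDown_length, hlen1]
      intro p j hp hj hjn
      rw [hlen2] at hjn
      by_cases hps : s ≤ p
      · exact ih' p j hps hj (by rw [hlen2]; exact hjn)
      · replace hps : p < s := by omega
        have hjp : p < j := by omega
        have hl2p : (hsiftDown (hswap l i s) s).getD p 0 = (hswap l i s).getD p 0 :=
          hsiftDown_outside _ _ p (not_isDesc_of_lt hps)
        by_cases hpi : p = i
        · subst hpi
          have hl1p : (hswap l p s).getD p 0 = l.getD s 0 :=
            hswap_getD_left l p s hin (by omega)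
          by_cases hjs : j = s
          · subst hjs
            -- goal: value at root ≤ value at j = s after the recursive sift
            rw [hl2p, hl1p]
            have hPs : HeapFrom l s := heapFrom_mono hP (by omega)
            have hlb : ∀ j', isDesc s j' = true → j' < (hswap l p s).length →
                l.getD s 0 ≤ (hswap l p s).getD j' 0 := by
              intro j' hd hjl
              rw [hlen1] at hjl
              by_cases hj's : j' = s
              · rw [hj's, hswap_getD_right l p s hn]
                exact hsmallest_le_root l p
              · have : j' ≠ p := by have := isDesc_le hd; omega
                rw [hswap_getD_other l p s j' this hj's]
                exact heap_chain l s hPs j' hd hjl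
            exact hsiftDown_lb _ _ _ hlb s (isDesc_self s) (by rw [hlen1]; exact hn)
          · -- j is the other child of p = i; untouched by the recursive sift
            have hjlt : isDesc s j = false := by
              rcases hc with hc1 | hc1 <;> rcases hj with hj1 | hj1 <;>
                first
                | (exact absurd (by omega : j = s) hjs)
                | (exact not_isDesc_of_lt (by omega))
                | (apply isDesc_false_step s j (by omega)
                   exact not_isDesc_of_lt (by omega))
            rw [hl2p, hl1p, hsiftDown_outside _ _ j hjlt,
                hswap_getD_other l p s j (by omega) hjs]
            exact hsmallest_le_child l p j hj hjn
        · -- i < p < s : pair untouched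
          have hpltj : p < s := hps
          have hjgt : s < j := by omega
          have hjdesc : isDesc s j = false :=
            isDesc_false_step s j hjgt (by
              have : (j-1)/2 = p := by omega
              rw [this]; exact not_isDesc_of_lt hps)
          rw [hl2p, hsiftDown_outside _ _ j hjdesc,
              hswap_getD_other l i s p hpi (by omega),
              hswap_getD_other l i s j (by omega) (by omega)]
          exact hP p j (by omega) hj hjn
theorem heapifyGo_perm (k : Nat) (l : List Int) : (heapifyGo k l).Perm l := by
  induction k generalizing l with
  | zero => exact List.Perm.refl l
  | succ k ih => exact (ih (hsiftDown l k)).trans (hsiftDown_perm l k)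

theorem heapifyGo_heap (k : Nat) (l : List Int) (h : HeapFrom l k) :
    HeapFrom (heapifyGo k l) 0 := by
  induction k generalizing l with
  | zero => exact h
  | succ k ih => exact ih (hsiftDown l k) (hsiftDown_heapFrom l k h)

theorem heapify_perm (l : List Int) : (heapify l).Perm l := heapifyGo_perm _ l

theorem heapify_heap (l : List Int) : HeapFrom (heapify l) 0 := by
  apply heapifyGo_heap
  intro p j hp hj hjn
  omega

theorem dropLast_getD (m : List Int) (k : Nat) (hk : k < m.length - 1) :
    (m.dropLast).getD k 0 = m.getD k 0 := by
  rw [List.getD_eq_getElem _ _ (by simp; omega), List.getD_eq_getElem _ _ (by omega),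
      List.getElem_dropLast]

theorem heappop_fst (l : List Int) (hne : l ≠ []) : (heappop l).1 = l.getD 0 0 := by
  match l with
  | [x] => rfl
  | x :: y :: xs => rfl

theorem heappop_perm (l : List Int) (hne : l ≠ []) :
    l.Perm ((heappop l).1 :: (heappop l).2) := by
  match l with
  | [x] => exact List.Perm.refl _
  | x :: y :: xs =>
    show (x :: y :: xs).Perm (x :: hsiftDown (((y :: xs).getLast (by simp)) :: (y :: xs).dropLast) 0)
    apply List.Perm.cons
    have h1 : (y :: xs).dropLast ++ [(y :: xs).getLast (by simp)] = y :: xs :=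
      List.dropLast_append_getLast (by simp)
    have p1 : (y :: xs).Perm (((y :: xs).getLast (by simp)) :: (y :: xs).dropLast) := by
      conv_lhs => rw [← h1]
      exact List.perm_append_singleton _ _
    exact p1.trans (hsiftDown_perm _ 0).symm

theorem heappop_min (l : List Int) (hh : HeapFrom l 0) (hne : l ≠ []) :
    ∀ y ∈ l, (heappop l).1 ≤ y := by
  intro y hy
  rw [heappop_fst l hne]
  obtain ⟨j, hj, rfl⟩ := List.getElem_of_mem hy
  have h0 := heap_chain l 0 hh j (isDesc_zero j) hj
  rw [List.getD_eq_getElem _ _ hj] at h0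
  exact h0

theorem heappop_heap (l : List Int) (hh : HeapFrom l 0) : HeapFrom (heappop l).2 0 := by
  match l with
  | [] => intro p j hp hj hjn; simp [heappop] at hjn
  | [x] => intro p j hp hj hjn; simp [heappop] at hjn
  | x :: y :: xs =>
    show HeapFrom (hsiftDown (((y :: xs).getLast (by simp)) :: (y :: xs).dropLast) 0) 0
    apply hsiftDown_heapFrom
    intro p j hp hj hjn
    have hm : (((y :: xs).getLast (by simp)) :: (y :: xs).dropLast).length
        = (x :: y :: xs).length - 1 := by simp
    rw [hm] at hjn
    have hgp : ∀ q : Nat, 1 ≤ q → q < (x :: y :: xs).length - 1 →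
        (((y :: xs).getLast (by simp)) :: (y :: xs).dropLast).getD q 0
          = (x :: y :: xs).getD q 0 := by
      intro q h1 h2
      obtain ⟨k, rfl⟩ : ∃ k, q = k + 1 := ⟨q - 1, by omega⟩
      rw [List.getD_cons_succ, List.getD_cons_succ]
      exact dropLast_getD (y :: xs) k (by simp at h2 ⊢; omega)
    rw [hgp p (by omega) (by omega), hgp j (by omega) hjn]
    exact hh p j (by omega) hj (by omega)
theorem hsiftUp_perm (l : List Int) (j : Nat) (hjn : j < l.length) : (hsiftUp l j).Perm l := by
  induction l, j using hsiftUp.induct with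
  | case1 l j hj hlt ih =>
    rw [hsiftUp, dif_pos hj, if_pos hlt]
    exact (ih (by rw [hswap_length]; omega)).trans
      (hswap_perm l j ((j-1)/2) hjn (by omega))
  | case2 l j hj hlt => rw [hsiftUp, dif_pos hj, if_neg hlt]
  | case3 l j hj => rw [hsiftUp, dif_neg hj]

theorem hsiftUp_heap (l : List Int) (j : Nat) (hjn : j < l.length)
    (h1 : ∀ p c, (c = 2*p+1 ∨ c = 2*p+2) → c < l.length → c ≠ j → l.getD p 0 ≤ l.getD c 0)
    (h2 : ∀ c, (c = 2*j+1 ∨ c = 2*j+2) → c < l.length → l.getD ((j-1)/2) 0 ≤ l.getD c 0) :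
    HeapFrom (hsiftUp l j) 0 := by
  induction l, j using hsiftUp.induct with
  | case3 l j hj =>
    -- j = 0: every child index is nonzero, h1 covers all pairs
    rw [hsiftUp, dif_neg hj]
    intro p c hp hc hcn
    exact h1 p c hc hcn (by omega)
  | case2 l j hj hlt =>
    rw [hsiftUp, dif_pos hj, if_neg hlt]
    intro p c hp hc hcn
    by_cases hcj : c = j
    · subst hcj
      have hpq : p = (c-1)/2 := by omega
      subst hpq
      omega
    · exact h1 p c hc hcn hcj
  | case1 l j hj hlt ih =>
    rw [hsiftUp, dif_pos hj, if_pos hlt]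
    have hq : (j-1)/2 < j := by omega
    have hqn : (j-1)/2 < l.length := by omega
    have hlj : (hswap l j ((j-1)/2)).getD j 0 = l.getD ((j-1)/2) 0 :=
      hswap_getD_left l j ((j-1)/2) hjn (by omega)
    have hlq : (hswap l j ((j-1)/2)).getD ((j-1)/2) 0 = l.getD j 0 :=
      hswap_getD_right l j ((j-1)/2) hqn
    have hother : ∀ c, c ≠ j → c ≠ (j-1)/2 →
        (hswap l j ((j-1)/2)).getD c 0 = l.getD c 0 := fun c a b =>
      hswap_getD_other l j ((j-1)/2) c a b
    apply ih (by rw [hswap_length]; omega)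
    · -- h1 for the swapped list, violations allowed only at (j-1)/2
      intro p c hc hcn hcq
      rw [hswap_length] at hcn
      by_cases hcj : c = j
      · subst hcj
        have hpq : p = (c-1)/2 := by omega
        subst hpq
        rw [hlj, hlq]
        omega
      · rw [hother c hcj hcq]
        by_cases hpq : p = (j-1)/2
        · subst hpq
          rw [hlq]
          have := h1 ((j-1)/2) c hc hcn hcj
          omega
        · by_cases hpj : p = j
          · subst hpj
            rw [hlj]
            exact h2 c hc hcn
          · rw [hother p hpj hpq]
            exact h1 p c hc hcn hcj
    · -- h2 for the swapped list at position (j-1)/2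
      intro c hc hcn
      rw [hswap_length] at hcn
      by_cases hq0 : (j-1)/2 = 0
      · have hr : (((j-1)/2)-1)/2 = (j-1)/2 := by omega
        rw [hr, hlq]
        by_cases hcj : c = j
        · subst hcj; rw [hlj]; omega
        · rw [hother c hcj (by omega)]
          have := h1 ((j-1)/2) c hc hcn hcj
          omega
      · have hrq : (((j-1)/2)-1)/2 ≠ (j-1)/2 := by omega
        have hrj : (((j-1)/2)-1)/2 ≠ j := by omega
        rw [hother _ hrj hrq]
        have hq1 : (j-1)/2 = 2*((((j-1)/2)-1)/2)+1 ∨ (j-1)/2 = 2*((((j-1)/2)-1)/2)+2 := by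
          omega
        have hbase := h1 _ _ hq1 hqn (by omega)
        by_cases hcj : c = j
        · subst hcj; rw [hlj]; exact hbase
        · rw [hother c hcj (by omega)]
          have := h1 ((j-1)/2) c hc hcn hcj
          omega

theorem getD_append_left (l t : List Int) (k : Nat) (hk : k < l.length) :
    (l ++ t).getD k 0 = l.getD k 0 := by
  rw [List.getD_eq_getElem _ _ (by simp; omega), List.getD_eq_getElem _ _ hk,
      List.getElem_append_left hk]

theorem heappush_perm (l : List Int) (x : Int) : (heappush l x).Perm (x :: l) := by
  unfold heappush
  exact (hsiftUp_perm (l ++ [x]) l.length (by simp)).trans (List.perm_append_singleton x l)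

theorem heappush_heap (l : List Int) (x : Int) (hh : HeapFrom l 0) :
    HeapFrom (heappush l x) 0 := by
  unfold heappush
  apply hsiftUp_heap (l ++ [x]) l.length (by simp)
  · intro p c hc hcn hcj
    simp at hcn
    have hcl : c < l.length := by omega
    have hpl : p < l.length := by omega
    rw [getD_append_left l [x] c hcl, getD_append_left l [x] p hpl]
    exact hh p c (by omega) hc hcl
  · intro c hc hcn
    simp at hcn
    omega
theorem min_eq_pop (h sc : List Int) (hh : HeapFrom h 0) (hperm : h.Perm sc) (hne : h ≠ []) :
    PySem.List.min? sc (fun x => x) = some (heappop h).1 := by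
  cases hmin : PySem.List.min? sc (fun x => x) with
  | none =>
    rw [PySem.List.min?_eq_none_iff] at hmin
    subst hmin
    exact absurd (List.Perm.eq_nil hperm) hne
  | some m =>
    have hm_mem : m ∈ sc := PySem.List.min?_mem hmin
    have h1 : (heappop h).1 ≤ m := heappop_min h hh hne m (hperm.mem_iff.mpr hm_mem)
    have hp_mem : (heappop h).1 ∈ h :=
      (heappop_perm h hne).mem_iff.mpr (List.mem_cons_self)
    have h2 : m ≤ (heappop h).1 := PySem.List.min?_isMin hmin _ (hperm.mem_iff.mp hp_mem)
    rw [le_antisymm h2 h1]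

theorem loopA_succ (fuel : Nat) (heap : List Int) (K answer : Int) :
    loopA (fuel+1) heap K answer =
      if heap.length ≤ 1 ∧ PySem.List.pyGetD heap 0 0 < K then -1
      else if (heappop heap).1 ≥ K then answer
      else loopA fuel
        (heappush (heappop (heappop heap).2).2
          ((heappop heap).1 + (heappop (heappop heap).2).1 * 2)) K (answer+1) := rfl

theorem loopB_succ (fuel : Nat) (sc : List Int) (K answer : Int) :
    loopB (fuel+1) sc K answer =
      if sc.length ≤ 1 ∧ PySem.List.pyGetD sc 0 0 < K then -1
      else match PySem.List.min? sc (fun x => x) with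
      | none => answer
      | some n1 =>
        if n1 ≥ K then answer
        else match PySem.List.min? ((PySem.List.remove? sc n1).getD sc) (fun x => x) with
        | none => answer
        | some n2 =>
          loopB fuel
            ((PySem.List.remove? ((PySem.List.remove? sc n1).getD sc) n2).getD
                ((PySem.List.remove? sc n1).getD sc) ++ [n1 + 2 * n2]) K (answer + 1) := rfl

theorem remove_min (sc : List Int) (v : Int) (hm : v ∈ sc) :
    (PySem.List.remove? sc v).getD sc = sc.erase v := by
  rw [PySem.List.remove?_eq_some_erase sc v hm]
  rfl

theorem loop_eq (fuel : Nat) : ∀ (h sc : List Int) (K ans : Int),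
    HeapFrom h 0 → h.Perm sc → loopA fuel h K ans = loopB fuel sc K ans := by
  induction fuel with
  | zero => intro h sc K ans _ _; rfl
  | succ fuel ih =>
    intro h sc K ans hh hperm
    have hlen := hperm.length_eq
    rw [loopA_succ, loopB_succ]
    match sc, hperm with
    | [], hperm =>
      have h0 : h = [] := List.Perm.eq_nil hperm
      subst h0
      have hn : PySem.List.min? ([] : List Int) (fun x => x) = none := by
        rw [PySem.List.min?_eq_none_iff]
      have hg : PySem.List.pyGetD ([] : List Int) 0 0 = 0 := by
        rw [PySem.List.pyGetD_zero]; rfl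
      simp only [hn, hg, heappop, List.length_nil]
      split_ifs with g1 g2
      · rfl
      · rfl
      · exact absurd (by omega : (0:Int) ≥ K) g2
    | [b], hperm =>
      have h0 : h = [b] := List.perm_singleton.mp hperm
      subst h0
      have hm : PySem.List.min? [b] (fun x => x) = some b := by
        rw [PySem.List.min?_id_cons]; rfl
      have hg : PySem.List.pyGetD [b] 0 0 = b := by
        rw [PySem.List.pyGetD_zero]; rfl
      have hrm : (PySem.List.remove? [b] b).getD [b] = ([] : List Int) := by
        rw [PySem.List.remove?_cons_self]; rfl
      have hn : PySem.List.min? ([] : List Int) (fun x => x) = none := by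
        rw [PySem.List.min?_eq_none_iff]
      simp only [hm, hg, hrm, hn, heappop, List.length_cons, List.length_nil]
      split_ifs with g1 g2
      · rfl
      · rfl
      · exact absurd (by omega : b ≥ K) g2
    | b :: c :: t, hperm =>
      have hlen2 : (2:Nat) ≤ h.length := by rw [hlen]; simp
      have hne : h ≠ [] := by intro e; rw [e] at hlen2; simp at hlen2
      have hguardA : ¬ (h.length ≤ 1 ∧ PySem.List.pyGetD h 0 0 < K) := by
        intro ⟨a, _⟩; omega
      have hguardB : ¬ ((b :: c :: t).length ≤ 1 ∧
          PySem.List.pyGetD (b :: c :: t) 0 0 < K) := by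
        intro ⟨a, _⟩; simp at a
      rw [if_neg hguardA, if_neg hguardB]
      have hmin1 := min_eq_pop h (b :: c :: t) hh hperm hne
      rw [hmin1]
      have hpop1 := heappop_perm h hne
      have hp1mem : (heappop h).1 ∈ (b :: c :: t) :=
        hperm.mem_iff.mp (hpop1.mem_iff.mpr List.mem_cons_self)
      have hrm1 : (PySem.List.remove? (b :: c :: t) (heappop h).1).getD (b :: c :: t)
          = (b :: c :: t).erase (heappop h).1 := remove_min _ _ hp1mem
      simp only [hrm1]
      by_cases hk1 : (heappop h).1 ≥ K
      · rw [if_pos hk1, if_pos hk1]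
      · rw [if_neg hk1, if_neg hk1]
        -- the rests after removing the first minimum are a permutation pair
        have perm1 : (heappop h).2.Perm ((b :: c :: t).erase (heappop h).1) := by
          have e2 : (b :: c :: t).Perm ((heappop h).1 :: (b :: c :: t).erase (heappop h).1) :=
            List.perm_cons_erase hp1mem
          exact (List.perm_cons (heappop h).1).mp (hpop1.symm.trans (hperm.trans e2))
        have hh1 : HeapFrom (heappop h).2 0 := heappop_heap h hh
        have h1ne : (heappop h).2 ≠ [] := by
          intro e
          have := hpop1.length_eq
          rw [e] at this
          simp at this
          omega
        have hmin2 := min_eq_pop (heappop h).2 _ hh1 perm1 h1ne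
        rw [hmin2]
        have hpop2 := heappop_perm (heappop h).2 h1ne
        have hp2mem : (heappop (heappop h).2).1 ∈ (b :: c :: t).erase (heappop h).1 :=
          perm1.mem_iff.mp (hpop2.mem_iff.mpr List.mem_cons_self)
        have hrm2 := remove_min _ _ hp2mem
        simp only [hrm2]
        -- both new pools are permutations of each other
        have perm2 : (heappop (heappop h).2).2.Perm
            (((b :: c :: t).erase (heappop h).1).erase (heappop (heappop h).2).1) := by
          have e2 := List.perm_cons_erase hp2mem
          exact (List.perm_cons (heappop (heappop h).2).1).mp
            (hpop2.symm.trans (perm1.trans e2))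
        have hv : (heappop h).1 + (heappop (heappop h).2).1 * 2
            = (heappop h).1 + 2 * (heappop (heappop h).2).1 := by ring
        apply ih
        · exact heappush_heap _ _ (heappop_heap _ hh1)
        · refine (heappush_perm _ _).trans ?_
          rw [hv]
          exact ((perm2.cons _).trans
            (List.perm_append_singleton _ _).symm)

-- ===== VERDICT (by name: the statement is the Claim_ definition above) =====
theorem solution_spec : Claim_equal_solution := by
  intro scoville K _hdom _hpre
  unfold Spec_solution solution solution_alt
  exact loop_eq (scoville.length + 1) (heapify scoville) scoville K 0
    (heapify_heap scoville) (heapify_perm scoville)
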